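-- pv_equiv track=rewrite | github.com/Vlammar/TALN | src/var_exp.py | POSambiguity
-- ===== SOURCE A (Python) =====
-- def getAllDifferrentFeatures(lines,feature):
-- 	feat={}
-- 	for w in lines:
-- 		feat[w[feature]]=1
-- 	return feat.keys()
--
-- def POSambiguity(lines):
-- 	words =  getAllDifferrentFeatures(lines,1)
-- 	dic = {}
-- 	for w in words:
-- 		dic[w] = {}
-- 	for l in lines:
-- 		if l[3] in dic[l[1]]:
-- 			dic[l[1]][l[3]] +=1
-- 		else :
-- 			dic[l[1]][l[3]] =1
-- 	return dic
-- ===== SOURCE B (Python) =====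
-- def tagCounts(tags):
-- 	return {t: tags.count(t) for t in dict.fromkeys(tags)}
--
-- def POSambiguity(lines):
-- 	words = dict.fromkeys(l[1] for l in lines)
-- 	return {w: tagCounts([l[3] for l in lines if l[1] == w]) for w in words}
-- ===== Notes on version B (the rewrite author's own statement) =====
-- stated objective: alternative
-- what changed: B replaces A's incremental nested-dict counting (index scan, pre-init loop, then mutating counts per line) by a declarative group-by: dedup the words with dict.fromkeys, and for each word build its tag dict from a filtered scan with list.count — no dict is ever mutated.
import Mathlib
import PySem

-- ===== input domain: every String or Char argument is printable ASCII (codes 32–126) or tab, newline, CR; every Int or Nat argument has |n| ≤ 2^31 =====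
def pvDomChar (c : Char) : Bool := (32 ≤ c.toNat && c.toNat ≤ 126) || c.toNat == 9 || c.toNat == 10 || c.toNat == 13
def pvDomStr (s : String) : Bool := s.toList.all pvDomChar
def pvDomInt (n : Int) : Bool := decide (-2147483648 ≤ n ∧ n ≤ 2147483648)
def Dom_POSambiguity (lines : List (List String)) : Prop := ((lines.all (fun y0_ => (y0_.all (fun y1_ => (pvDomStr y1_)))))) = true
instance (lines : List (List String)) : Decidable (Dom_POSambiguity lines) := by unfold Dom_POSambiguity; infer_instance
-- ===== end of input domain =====

-- B replaces A's incremental nested-dict counting by a declarative group-by (dedup the words,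
-- then a filtered scan with list.count per word); not faster, a different algorithm of O(n^2) cost.

-- ===== PORT A =====
-- feat[w[feature]] = 1 per line, then feat.keys(); w[feature] via pyGetD is exact under Pre_
def getAllDifferrentFeatures (lines : List (List String)) (feature : Int) : List String :=
  (lines.foldl (fun feat w => feat.insert (PySem.List.pyGetD w feature "") (1 : Int))
    PySem.Dict.empty).keys

-- body of A's counting loop: dic[l[1]] read (key present under Pre_), branch on l[3] membership,
-- in-place mutation of the inner dict modeled by re-inserting it at its key (position kept)
def pvStepA (dic : PySem.Dict String (PySem.Dict String Int)) (l : List String) :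
    PySem.Dict String (PySem.Dict String Int) :=
  let inner := dic.getD (PySem.List.pyGetD l 1 "") PySem.Dict.empty
  if inner.contains (PySem.List.pyGetD l 3 "") then
    dic.insert (PySem.List.pyGetD l 1 "")
      (inner.insert (PySem.List.pyGetD l 3 "") (inner.getD (PySem.List.pyGetD l 3 "") 0 + 1))
  else
    dic.insert (PySem.List.pyGetD l 1 "") (inner.insert (PySem.List.pyGetD l 3 "") 1)

def POSambiguity (lines : List (List String)) : List (String × List (String × Int)) :=
  let words := getAllDifferrentFeatures lines 1
  let dic0 := words.foldl
    (fun d w => d.insert w (PySem.Dict.empty : PySem.Dict String Int)) PySem.Dict.empty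
  ((lines.foldl pvStepA dic0).items).map (fun p => (p.1, p.2.items))

-- ===== PORT B =====
-- {t: tags.count(t) for t in dict.fromkeys(tags)}
def tagCounts (tags : List String) : List (String × Int) :=
  (PySem.List.dedup tags).map (fun t => (t, (tags.count t : Int)))

-- {w: tagCounts([l[3] for l in lines if l[1] == w]) for w in dict.fromkeys(l[1] for l in lines)}
def POSambiguity_alt (lines : List (List String)) : List (String × List (String × Int)) :=
  (PySem.List.dedup (lines.map (fun l => PySem.List.pyGetD l 1 ""))).map
    (fun w => (w, tagCounts
      ((lines.filter (fun l => PySem.List.pyGetD l 1 "" == w)).map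
        (fun l => PySem.List.pyGetD l 3 ""))))

-- ===== PRECONDITION & SPEC =====
-- Pre_ excludes exactly the inputs where Python A raises IndexError: a line shorter than 4
-- elements (A reads l[1] and l[3]).
def Pre_POSambiguity (lines : List (List String)) : Prop := ∀ l ∈ lines, 4 ≤ l.length
instance (lines : List (List String)) : Decidable (Pre_POSambiguity lines) := by
  unfold Pre_POSambiguity; infer_instance
def pvWitness_POSambiguity : List (List String) :=
  [["1", "dog", "x", "NN"], ["2", "dog", "y", "VB"], ["3", "cat", "z", "NN"]]

def Spec_POSambiguity (lines : List (List String)) (out : List (String × List (String × Int))) :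
    Prop := out = POSambiguity_alt lines
instance (lines : List (List String)) (out : List (String × List (String × Int))) :
    Decidable (Spec_POSambiguity lines out) := by unfold Spec_POSambiguity; infer_instance

-- ===== CLAIM (what is proved, stated in full; the proofs are below) =====
def Claim_equal_POSambiguity : Prop := ∀ (lines : List (List String)), Dom_POSambiguity lines →
  Pre_POSambiguity lines → Spec_POSambiguity lines (POSambiguity lines)

-- ===== LEMMAS AND PROOFS =====

-- abbreviations for the two field reads
def pvG1 (l : List String) : String := PySem.List.pyGetD l 1 ""
def pvG3 (l : List String) : String := PySem.List.pyGetD l 3 ""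

-- the inner-dict update both of A's branches perform: c[t] = c.get(t, 0) + 1
def pvBump (c : PySem.Dict String Int) (t : String) : PySem.Dict String Int :=
  c.insert t (c.getD t 0 + 1)

lemma pv_stepA_eq (d : PySem.Dict String (PySem.Dict String Int)) (l : List String) :
    pvStepA d l = d.insert (pvG1 l) (pvBump (d.getD (pvG1 l) PySem.Dict.empty) (pvG3 l)) := by
  simp only [pvStepA, pvBump, pvG1, pvG3]
  split
  · rfl
  · rename_i h
    have h0 := PySem.Dict.getD_of_not_contains
      (d.getD (PySem.List.pyGetD l 1 "") PySem.Dict.empty) (0 : Int)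
      (Bool.eq_false_iff.mpr h)
    rw [h0]
    norm_num

-- MAIN INVARIANT: folding A's counting loop over `rest` on a dict that already contains every
-- word of `rest` rewrites each stored inner dict in place, bumping it with that word's tags.
lemma pv_fold_items (rest : List (List String)) (d : PySem.Dict String (PySem.Dict String Int))
    (hnd : d.keys.Nodup) (hc : ∀ l ∈ rest, d.contains (pvG1 l) = true) :
    (rest.foldl pvStepA d).items = d.items.map (fun p =>
      (p.1, ((rest.filter (fun l => pvG1 l == p.1)).map pvG3).foldl pvBump p.2)) := by
  induction rest generalizing d with
  | nil => simp
  | cons l t ih =>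
    have hk : d.contains (pvG1 l) = true := hc l (List.mem_cons_self ..)
    have hkeys : (pvStepA d l).keys = d.keys := by
      rw [pv_stepA_eq]; exact PySem.Dict.keys_insert_of_contains _ _ hk
    have hnd' : (pvStepA d l).keys.Nodup := hkeys ▸ hnd
    have hc' : ∀ l' ∈ t, (pvStepA d l).contains (pvG1 l') = true := by
      intro l' hl'
      rw [pv_stepA_eq, PySem.Dict.contains_insert]
      simp [hc l' (List.mem_cons_of_mem _ hl')]
    rw [List.foldl_cons, ih _ hnd' hc', pv_stepA_eq,
      PySem.Dict.items_insert_of_contains _ _ hk, List.map_map]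
    apply List.map_congr_left
    rintro ⟨a, b⟩ hab
    have hb : d.getD a PySem.Dict.empty = b :=
      PySem.Dict.getD_of_mem_items d hab hnd PySem.Dict.empty
    by_cases h : a = pvG1 l
    · subst h
      simp [hb]
    · have h2 : (pvG1 l == a) = false := by
        simp only [beq_eq_false_iff_ne]; exact fun e => h e.symm
      simp [Function.comp, h, h2]

-- ===== VERDICT (by name: the statement is the Claim_ definition above) =====
theorem POSambiguity_spec : Claim_equal_POSambiguity := by
  intro lines _ _
  have e1 : ∀ l : List String, PySem.List.pyGetD l 1 "" = pvG1 l := fun _ => rfl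
  have e3 : ∀ l : List String, PySem.List.pyGetD l 3 "" = pvG3 l := fun _ => rfl
  simp only [Spec_POSambiguity, POSambiguity, POSambiguity_alt, getAllDifferrentFeatures,
    tagCounts, e1, e3]
  have hwords : (lines.foldl (fun feat w => feat.insert (pvG1 w) (1 : Int))
      PySem.Dict.empty).keys = PySem.Set.ofList (lines.map pvG1) := by
    have h := PySem.Dict.keys_foldl_insert_key (ν := Int) lines pvG1
      (fun _ _ => (1 : Int)) PySem.Dict.empty
    simpa [PySem.Dict.keys_empty, PySem.Set.update_nil_left] using h
  rw [hwords]
  set ws := PySem.Set.ofList (lines.map pvG1) with hws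
  have hndws : ws.Nodup := PySem.Set.nodup_ofList _
  have hitems0 : ((ws.foldl (fun d w => d.insert w (PySem.Dict.empty : PySem.Dict String Int))
      PySem.Dict.empty)).items
      = ws.map (fun w => (w, (PySem.Dict.empty : PySem.Dict String Int))) := by
    have h := PySem.Dict.items_foldl_insert_fresh ws (fun w => w)
      (fun _ => (PySem.Dict.empty : PySem.Dict String Int)) PySem.Dict.empty
      (by intro a _; simp) (by simpa using hndws)
    simpa using h
  have hkeys0 : ((ws.foldl (fun d w => d.insert w (PySem.Dict.empty : PySem.Dict String Int))
      PySem.Dict.empty)).keys = ws := by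
    simp [PySem.Dict.keys, hitems0, Function.comp_def]
  have hnd0 : ((ws.foldl (fun d w => d.insert w (PySem.Dict.empty : PySem.Dict String Int))
      PySem.Dict.empty)).keys.Nodup := by rw [hkeys0]; exact hndws
  have hc0 : ∀ l ∈ lines, ((ws.foldl
      (fun d w => d.insert w (PySem.Dict.empty : PySem.Dict String Int))
      PySem.Dict.empty)).contains (pvG1 l) = true := by
    intro l hl
    rw [PySem.Dict.contains_eq_decide_mem_keys, hkeys0, hws]
    simp only [decide_eq_true_eq, PySem.Set.mem_ofList]
    exact List.mem_map_of_mem hl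
  rw [pv_fold_items lines _ hnd0 hc0, hitems0, List.map_map, List.map_map, hws,
    ← PySem.List.dedup_eq_ofList]
  apply List.map_congr_left
  intro w _
  simp only [Function.comp]
  have hpb : pvBump = fun c t => c.insert t (c.getD t 0 + 1) := rfl
  rw [hpb, PySem.Dict.foldl_insert_getD_add_one_eq_counter, PySem.Dict.items_counter,
    ← PySem.List.dedup_eq_ofList]
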